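-- pv_equiv track=rewrite | github.com/atc1441/ATC_MiThermometer | ATCtelink_one_way.py | sws_encode_blk
-- ===== SOURCE A (Python) =====
-- def sws_encode_blk(blk):
-- 	pkt=[]
-- 	d = bytearray(10) # word swire 10 bits
-- 	d[0] = 0x80 # start bit byte cmd swire = 1
-- 	for el in blk:
-- 		m = 0x80 # mask bit
-- 		idx = 1
-- 		while m != 0:
-- 			if (el & m) != 0:
-- 				d[idx] = 0x80
-- 			else:
-- 				d[idx] = 0xfe
-- 			idx += 1
-- 			m >>= 1
-- 		d[9] = 0xfe # stop bit swire = 0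
-- 		pkt += d
-- 		d[0] = 0xfe # start bit next byte swire = 0
-- 	return pkt
-- ===== SOURCE B (Python) =====
-- # Table-driven re-encoder: precompute the 8-byte swire encoding of every byte
-- # value once, then emit flat segments per input byte.
-- _TABLE = [[0x80 if (v >> (7 - i)) & 1 else 0xfe for i in range(8)] for v in range(256)]
--
--
-- def sws_encode_blk(blk):
--     out = []
--     for i, el in enumerate(blk):
--         out.append(0x80 if i == 0 else 0xfe)
--         out.extend(_TABLE[el & 0xff])
--         out.append(0xfe)
--     return out
-- ===== Notes on version B (the rewrite author's own statement) =====
-- stated objective: faster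
-- what changed: Replaces the mutable 10-byte buffer with its per-element mask-shifting inner bit loop by a one-time precomputed 256-entry lookup table of 8-byte encodings, emitting each word as a flat segment with the start byte chosen from the enumerate index.
import Mathlib
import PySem

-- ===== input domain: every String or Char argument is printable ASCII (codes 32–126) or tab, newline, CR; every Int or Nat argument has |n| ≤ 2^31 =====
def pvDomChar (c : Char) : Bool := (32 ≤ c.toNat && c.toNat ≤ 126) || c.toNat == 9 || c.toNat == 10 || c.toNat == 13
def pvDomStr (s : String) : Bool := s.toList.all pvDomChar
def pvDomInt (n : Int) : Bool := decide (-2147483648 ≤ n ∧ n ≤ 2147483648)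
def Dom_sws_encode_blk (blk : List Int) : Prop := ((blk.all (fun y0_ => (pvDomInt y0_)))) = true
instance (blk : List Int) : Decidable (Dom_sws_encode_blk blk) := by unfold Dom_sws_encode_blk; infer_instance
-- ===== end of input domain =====

-- B replaces A's mutable 10-byte buffer and inner mask-shifting bit loop by a
-- precomputed 256-entry lookup table of 8-byte encodings (measured faster at large n).


-- ===== PORT A =====
-- the inner 'while m != 0' loop: sets d[idx] per bit, halving the mask
def swsBits (el : Int) (m : Nat) (idx : Nat) (d : List Int) : List Int :=
  if m = 0 then d
  else
    swsBits el (m >>> 1) (idx + 1)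
      (d.set idx (if PySem.Int.band el (m : Int) ≠ 0 then 0x80 else 0xfe))
termination_by m
decreasing_by simpa [Nat.shiftRight_succ] using Nat.div_lt_self (Nat.pos_of_ne_zero (by assumption)) (by norm_num)

def sws_encode_blk (blk : List Int) : List Int :=
  let d : List Int := (List.replicate 10 0).set 0 0x80
  (blk.foldl
    (fun (st : List Int × List Int) el =>
      let d := swsBits el 0x80 1 st.2
      let d := d.set 9 0xfe
      (st.1 ++ d, d.set 0 0xfe))
    (([] : List Int), d)).1

-- ===== PORT B =====
def encRow (v : Nat) : List Int :=
  (List.range 8).map (fun i => if (v >>> (7 - i)) &&& 1 ≠ 0 then 0x80 else 0xfe)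

def swsTable : List (List Int) := (List.range 256).map encRow

def sws_encode_blk_alt (blk : List Int) : List Int :=
  (PySem.List.enumerate blk).foldl
    (fun out p =>
      ((out ++ [if p.1 = 0 then (0x80 : Int) else 0xfe])
        ++ PySem.List.pyGetD swsTable (PySem.Int.band p.2 255) [])
        ++ [0xfe])
    []

-- ===== PRECONDITION & SPEC =====
def Spec_sws_encode_blk (blk : List Int) (out : List Int) : Prop := out = sws_encode_blk_alt blk
instance (blk : List Int) (out : List Int) : Decidable (Spec_sws_encode_blk blk out) := by unfold Spec_sws_encode_blk; infer_instance

-- ===== CLAIM (what is proved, stated in full; the proofs are below) =====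
def Claim_equal_sws_encode_blk : Prop := ∀ (blk : List Int), Dom_sws_encode_blk blk → Spec_sws_encode_blk blk (sws_encode_blk blk)

-- ===== LEMMAS AND PROOFS =====

-- the 8 data bytes A writes for element el
def rowA (el : Int) : List Int :=
  [if PySem.Int.band el 128 ≠ 0 then 0x80 else 0xfe,
   if PySem.Int.band el 64 ≠ 0 then 0x80 else 0xfe,
   if PySem.Int.band el 32 ≠ 0 then 0x80 else 0xfe,
   if PySem.Int.band el 16 ≠ 0 then 0x80 else 0xfe,
   if PySem.Int.band el 8 ≠ 0 then 0x80 else 0xfe,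
   if PySem.Int.band el 4 ≠ 0 then 0x80 else 0xfe,
   if PySem.Int.band el 2 ≠ 0 then 0x80 else 0xfe,
   if PySem.Int.band el 1 ≠ 0 then 0x80 else 0xfe]

-- the word-list both programs produce, first start byte s, later ones 0xfe
def words : List Int → Int → List Int
  | [], _ => []
  | el :: rest, s => ((s :: rowA el) ++ [0xfe]) ++ words rest 0xfe

theorem nat_and255 (n : Nat) : n &&& 255 = n % 256 := by
  have := Nat.and_two_pow_sub_one_eq_mod n 8
  norm_num at this ⊢; omega

theorem band255 (a : Int) : PySem.Int.band a 255 = a % 256 := by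
  rw [PySem.Int.band.eq_1]
  have h255 : Int.toNat 255 = 255 := rfl
  by_cases h : 0 ≤ a
  · simp only [h, if_true, (by norm_num : (0:Int) ≤ 255), h255, nat_and255]
    omega
  · simp only [h, if_false, if_true, (by norm_num : (0:Int) ≤ 255), h255]
    rw [Nat.and_comm, nat_and255]
    omega

theorem nat_and_pow_mod (n : Nat) (j : Fin 8) :
    n &&& 2 ^ (j : Nat) = (n % 256) &&& 2 ^ (j : Nat) := by
  rw [Nat.and_two_pow, Nat.and_two_pow]
  have h256 : (256 : Nat) = 2 ^ 8 := by norm_num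
  rw [h256, Nat.testBit_mod_two_pow]
  simp [j.isLt]

set_option maxRecDepth 40000 in
theorem compl_and_pow (x : Fin 256) (j : Fin 8) :
    ((2 ^ (j : Nat) - (2 ^ (j : Nat) &&& (x : Nat)) ≠ 0) ↔ ((255 - (x : Nat)) &&& 2 ^ (j : Nat) ≠ 0)) := by
  revert x j; decide

theorem band_pow_bridge (a : Int) (j : Fin 8) :
    (PySem.Int.band a (2 ^ (j : Nat)) ≠ 0 ↔ (a % 256).toNat &&& 2 ^ (j : Nat) ≠ 0) := by
  have hpow : ((2 : Int) ^ (j : Nat)).toNat = 2 ^ (j : Nat) := by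
    rw [show ((2:Int) ^ (j:Nat)) = ((2 ^ (j:Nat) : Nat) : Int) by push_cast; ring]
    exact Int.toNat_natCast _
  rw [PySem.Int.band.eq_1]
  have hp : (0 : Int) ≤ 2 ^ (j : Nat) := by positivity
  by_cases h : 0 ≤ a
  · simp only [h, if_true, hp, hpow]
    have h1 : (a % 256).toNat = a.toNat % 256 := by omega
    rw [h1, ← nat_and_pow_mod]
    simp
  · simp only [h, if_false, hp, if_true, hpow]
    have hx : ((-a - 1).toNat) % 256 < 256 := by omega
    have h2 : (a % 256).toNat = 255 - ((-a - 1).toNat % 256) := by omega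
    rw [h2, Nat.and_comm (2 ^ (j:Nat)), nat_and_pow_mod ((-a-1).toNat) j, Nat.and_comm]
    have hc := compl_and_pow ⟨(-a - 1).toNat % 256, hx⟩ j
    simp only at hc
    rw [← hc]
    simp

set_option maxRecDepth 40000 in
theorem rowFin (r : Fin 256) :
    [if (r : Nat) &&& 128 ≠ 0 then (0x80 : Int) else 0xfe,
     if (r : Nat) &&& 64 ≠ 0 then (0x80 : Int) else 0xfe,
     if (r : Nat) &&& 32 ≠ 0 then (0x80 : Int) else 0xfe,
     if (r : Nat) &&& 16 ≠ 0 then (0x80 : Int) else 0xfe,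
     if (r : Nat) &&& 8 ≠ 0 then (0x80 : Int) else 0xfe,
     if (r : Nat) &&& 4 ≠ 0 then (0x80 : Int) else 0xfe,
     if (r : Nat) &&& 2 ≠ 0 then (0x80 : Int) else 0xfe,
     if (r : Nat) &&& 1 ≠ 0 then (0x80 : Int) else 0xfe] = encRow (r : Nat) := by
  revert r; decide

theorem row_eq (el : Int) :
    rowA el = PySem.List.pyGetD swsTable (PySem.Int.band el 255) [] := by
  have hr : (el % 256).toNat < 256 := by omega
  have hcast : PySem.Int.band el 255 = (((el % 256).toNat : Nat) : Int) := by
    rw [band255]; omega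
  rw [hcast, PySem.List.pyGetD_natCast]
  have hget : swsTable.getD (el % 256).toNat [] = encRow (el % 256).toNat := by
    simp [swsTable, List.getD, hr]
  rw [hget, ← rowFin ⟨(el % 256).toNat, hr⟩]
  have b7 := band_pow_bridge el ⟨7, by norm_num⟩
  have b6 := band_pow_bridge el ⟨6, by norm_num⟩
  have b5 := band_pow_bridge el ⟨5, by norm_num⟩
  have b4 := band_pow_bridge el ⟨4, by norm_num⟩
  have b3 := band_pow_bridge el ⟨3, by norm_num⟩
  have b2 := band_pow_bridge el ⟨2, by norm_num⟩
  have b1 := band_pow_bridge el ⟨1, by norm_num⟩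
  have b0 : ¬PySem.Int.band el 1 = 0 ↔ ¬(el % 256).toNat &&& 1 = 0 := by
    simpa using band_pow_bridge el ⟨0, by norm_num⟩
  norm_num at b7 b6 b5 b4 b3 b2 b1
  simp only [rowA, b7, b6, b5, b4, b3, b2, b1, b0]

theorem word_eval (el s a1 a2 a3 a4 a5 a6 a7 a8 a9 : Int) :
    (swsBits el 128 1 [s, a1, a2, a3, a4, a5, a6, a7, a8, a9]).set 9 0xfe
      = (s :: rowA el) ++ [0xfe] := by
  rw [swsBits, swsBits, swsBits, swsBits, swsBits, swsBits, swsBits, swsBits, swsBits]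
  simp [rowA, List.set]

theorem foldA (blk : List Int) : ∀ (pkt : List Int) (s a1 a2 a3 a4 a5 a6 a7 a8 a9 : Int),
    (blk.foldl
      (fun (st : List Int × List Int) el =>
        let d := swsBits el 0x80 1 st.2
        let d := d.set 9 0xfe
        (st.1 ++ d, d.set 0 0xfe))
      (pkt, [s, a1, a2, a3, a4, a5, a6, a7, a8, a9])).1 = pkt ++ words blk s := by
  induction blk with
  | nil => intro pkt s a1 a2 a3 a4 a5 a6 a7 a8 a9; simp [words]
  | cons el rest ih =>
    intro pkt s a1 a2 a3 a4 a5 a6 a7 a8 a9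
    simp only [List.foldl_cons]
    rw [word_eval el s a1 a2 a3 a4 a5 a6 a7 a8 a9]
    simp only [rowA, List.cons_append, List.nil_append, List.set_cons_zero]
    rw [ih]
    simp [words, rowA]

theorem foldB (blk : List Int) : ∀ (out : List Int) (i : Int), 1 ≤ i →
    ((PySem.List.enumerate blk i).foldl
      (fun out p =>
        ((out ++ [if p.1 = 0 then (0x80 : Int) else 0xfe])
          ++ PySem.List.pyGetD swsTable (PySem.Int.band p.2 255) [])
          ++ [0xfe])
      out) = out ++ words blk 0xfe := by
  induction blk with
  | nil => intro out i _; simp [PySem.List.enumerate_nil, words]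
  | cons el rest ih =>
    intro out i hi
    rw [PySem.List.enumerate_cons]
    simp only [List.foldl_cons]
    rw [if_neg (by omega : ¬ i = 0), ← row_eq el, ih _ (i + 1) (by omega)]
    simp [words, List.append_assoc]

-- ===== VERDICT (by name: the statement is the Claim_ definition above) =====
theorem sws_encode_blk_spec : Claim_equal_sws_encode_blk := by
  intro blk _
  unfold Spec_sws_encode_blk sws_encode_blk sws_encode_blk_alt
  cases blk with
  | nil => rfl
  | cons el rest =>
    rw [show ((List.replicate 10 (0:Int)).set 0 0x80) = [0x80,0,0,0,0,0,0,0,0,0] from rfl]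
    simp only [foldA (el :: rest) [] 0x80 0 0 0 0 0 0 0 0 0, List.nil_append]
    rw [PySem.List.enumerate_cons]
    simp only [List.foldl_cons, zero_add, if_true]
    rw [← row_eq el, foldB rest _ 1 (by norm_num)]
    simp [words, List.append_assoc]
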